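-- pv_equiv track=rewrite | github.com/wyk18703232953/myResearch | codeComplex/data/filteredData/python/logn/python_logn_0426.py | solve
-- ===== SOURCE A (Python) =====
-- def pow4(x, p):
--     ret = 1
--     for _ in range(p):
--         ret = ret * x
--     return ret
--
-- def rate(p):
--     ret = 0
--     now = 1
--     for _ in range(p):
--         ret = ret + now
--         now = now * 4
--     return ret
--
-- def solve(n, k):
--     if n > 35:
--         return "YES %d" % (n - 1)
--     mSplit = 1
--     cnt1 = 0
--     cnt3 = 1
--     for i in range(1, n + 1):
--         now = pow4(4, i) - pow4(2, i + 1) + 1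
--         now = now * rate(n - i) + rate(i)
--         if k <= now:
--             return "YES %d" % (n - i)
--         mSplit = mSplit + cnt1 + cnt3 * 3
--         cnt1 = cnt1 + cnt3
--         cnt3 = cnt3 + cnt3
--         if mSplit > k:
--             break
--     return "NO"
-- ===== SOURCE B (Python) =====
-- def solve(n, k):
--     if n > 35:
--         return "YES %d" % (n - 1)
--     for i in range(1, n + 1):
--         now = 4**i - 2**(i + 1) + 1
--         now = now * ((4**(n - i) - 1) // 3) + (4**i - 1) // 3
--         if k <= now:
--             return "YES %d" % (n - i)
--         if 2**(i + 2) - i - 3 > k: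
--             return "NO"
--     return "NO"
-- ===== Notes on version B (the rewrite author's own statement) =====
-- stated objective: simpler
-- what changed: B replaces the pow4/rate helper loops and the mSplit/cnt1/cnt3 running accumulators with closed-form formulas (4**i, (4**p-1)//3, break threshold 2**(i+2)-i-3), keeping only the outer loop over i.
import Mathlib
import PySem

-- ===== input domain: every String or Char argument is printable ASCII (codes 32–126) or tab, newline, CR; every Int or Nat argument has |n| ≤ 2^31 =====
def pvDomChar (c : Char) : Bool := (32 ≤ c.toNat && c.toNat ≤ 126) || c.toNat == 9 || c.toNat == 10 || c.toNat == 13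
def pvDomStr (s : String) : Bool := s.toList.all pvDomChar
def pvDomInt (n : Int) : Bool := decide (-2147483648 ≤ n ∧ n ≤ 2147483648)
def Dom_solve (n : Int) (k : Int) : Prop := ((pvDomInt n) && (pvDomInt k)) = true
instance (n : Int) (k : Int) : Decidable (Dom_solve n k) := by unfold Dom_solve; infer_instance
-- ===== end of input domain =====

-- B computes the helper values and the break threshold by closed formulas instead of A's
-- helper loops and running accumulators (objective: simpler; same loop order and break point).

-- ===== PORT A =====
-- pow4(x, p): ret = 1; for _ in range(p): ret = ret * x
def pow4Go (x : Int) : Nat → Int → Int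
  | 0, ret => ret
  | Nat.succ m, ret => pow4Go x m (ret * x)

def pow4 (x : Int) (p : Int) : Int := pow4Go x p.toNat 1

-- rate(p): ret = 0; now = 1; for _ in range(p): ret += now; now *= 4
def rateGo : Nat → Int → Int → Int
  | 0, ret, _ => ret
  | Nat.succ m, ret, now => rateGo m (ret + now) (now * 4)

def rate (p : Int) : Int := rateGo p.toNat 0 1

-- the for-loop of solve; the Nat counter is the number of remaining iterations of range(1, n+1)
def solveGo (n k : Int) : Nat → Int → Int → Int → Int → String
  | 0, _, _, _, _ => "NO"
  | Nat.succ m, i, mSplit, cnt1, cnt3 =>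
    let now := pow4 4 i - pow4 2 (i + 1) + 1
    let now2 := now * rate (n - i) + rate i
    if k ≤ now2 then "YES " ++ PySem.Int.toStr (n - i)
    else
      let mSplit' := mSplit + cnt1 + cnt3 * 3
      let cnt1' := cnt1 + cnt3
      let cnt3' := cnt3 + cnt3
      if mSplit' > k then "NO"
      else solveGo n k m (i + 1) mSplit' cnt1' cnt3'

def solve (n : Int) (k : Int) : String :=
  if n > 35 then "YES " ++ PySem.Int.toStr (n - 1)
  else solveGo n k n.toNat 1 1 0 1

-- ===== PORT B =====
-- 4**i etc. are ported as 4 ^ i.toNat: exact, since every exponent reached in the loop is ≥ 0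
def solveAltGo (n k : Int) : Nat → Int → String
  | 0, _ => "NO"
  | Nat.succ m, i =>
    let now := 4 ^ i.toNat - 2 ^ (i + 1).toNat + 1
    let now2 := now * PySem.Int.floordiv (4 ^ (n - i).toNat - 1) 3
                  + PySem.Int.floordiv (4 ^ i.toNat - 1) 3
    if k ≤ now2 then "YES " ++ PySem.Int.toStr (n - i)
    else if 2 ^ (i + 2).toNat - i - 3 > k then "NO"
    else solveAltGo n k m (i + 1)

def solve_alt (n : Int) (k : Int) : String :=
  if n > 35 then "YES " ++ PySem.Int.toStr (n - 1)
  else solveAltGo n k n.toNat 1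

-- ===== PRECONDITION & SPEC =====
def Spec_solve (n : Int) (k : Int) (out : String) : Prop := out = solve_alt n k
instance (n : Int) (k : Int) (out : String) : Decidable (Spec_solve n k out) := by unfold Spec_solve; infer_instance

-- ===== CLAIM (what is proved, stated in full; the proofs are below) =====
def Claim_equal_solve : Prop := ∀ (n : Int) (k : Int), Dom_solve n k → Spec_solve n k (solve n k)

-- ===== LEMMAS AND PROOFS =====

theorem pow4Go_eq (x : Int) : ∀ (m : Nat) (ret : Int), pow4Go x m ret = ret * x ^ m := by
  intro m
  induction m with
  | zero => intro ret; simp [pow4Go]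
  | succ m ih => intro ret; simp [pow4Go, ih, pow_succ]; ring

theorem pow4_eq (x p : Int) : pow4 x p = x ^ p.toNat := by
  simp [pow4, pow4Go_eq]

-- rate satisfies 3 * rate p + 1 = 4 ^ p.toNat (geometric sum)
theorem rateGo_eq : ∀ (m : Nat) (ret now : Int), 3 * rateGo m ret now = 3 * ret + now * (4 ^ m - 1) := by
  intro m
  induction m with
  | zero => intro ret now; simp [rateGo]
  | succ m ih => intro ret now; simp [rateGo, ih, pow_succ]; ring

theorem rate_eq (p : Int) : 3 * rate p = 4 ^ p.toNat - 1 := by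
  have := rateGo_eq p.toNat 0 1
  simpa [rate] using this

theorem floordiv_rate (p : Int) : PySem.Int.floordiv (4 ^ p.toNat - 1) 3 = rate p := by
  have h3 := rate_eq p
  have : (4 : Int) ^ p.toNat - 1 = rate p * 3 := by omega
  rw [this, PySem.Int.floordiv_eq_ediv_of_pos (by norm_num)]
  exact Int.mul_ediv_cancel _ (by norm_num)

theorem go_eq (n k : Int) : ∀ (m j : Nat),
    solveGo n k m ((j : Int) + 1) (2 ^ (j + 2) - (j : Int) - 3) (2 ^ j - 1) (2 ^ j)
      = solveAltGo n k m ((j : Int) + 1) := by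
  intro m
  induction m with
  | zero => intro j; rfl
  | succ m ih =>
    intro j
    have hi : ((j : Int) + 1).toNat = j + 1 := by omega
    have hi1 : ((j : Int) + 1 + 1).toNat = j + 2 := by omega
    have hi2 : ((j : Int) + 1 + 2).toNat = j + 3 := by omega
    have hA : PySem.Int.floordiv (4 ^ (n - ((j : Int) + 1)).toNat - 1) 3
        = rate (n - ((j : Int) + 1)) := floordiv_rate _
    have hB : PySem.Int.floordiv (4 ^ (j + 1) - 1) 3 = rate ((j : Int) + 1) := by
      have := floordiv_rate ((j : Int) + 1); rwa [hi] at this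
    simp only [solveGo, solveAltGo, pow4_eq, hi, hi1, hi2, hA, hB]
    by_cases hk : k ≤ (4 ^ (j + 1) - 2 ^ (j + 2) + 1) * rate (n - ((j : Int) + 1)) + rate ((j : Int) + 1)
    · rw [if_pos hk, if_pos hk]
    · rw [if_neg hk, if_neg hk]
      have e2 : (2 : Int) ^ (j + 2) = 4 * 2 ^ j := by rw [pow_succ, pow_succ]; ring
      have e3 : (2 : Int) ^ (j + 3) = 8 * 2 ^ j := by rw [pow_succ, pow_succ, pow_succ]; ring
      have hms : (2 : Int) ^ (j + 2) - (j : Int) - 3 + (2 ^ j - 1) + 2 ^ j * 3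
          = 2 ^ (j + 3) - ((j : Int) + 1) - 3 := by rw [e2, e3]; ring
      rw [hms]
      by_cases hb : 2 ^ (j + 3) - ((j : Int) + 1) - 3 > k
      · rw [if_pos hb, if_pos hb]
      · rw [if_neg hb, if_neg hb]
        have h1 : (2 : Int) ^ j - 1 + 2 ^ j = 2 ^ (j + 1) - 1 := by rw [pow_succ]; ring
        have h2 : (2 : Int) ^ j + 2 ^ j = 2 ^ (j + 1) := by rw [pow_succ]; ring
        have h3 : (2 : Int) ^ (j + 3) - ((j : Int) + 1) - 3
            = 2 ^ ((j + 1) + 2) - ((j + 1 : Nat) : Int) - 3 := by push_cast; ring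
        have h4 : ((j : Int) + 1) + 1 = (((j + 1 : Nat) : Int)) + 1 := by push_cast; ring
        rw [h1, h2, h3, h4]
        exact ih (j + 1)

-- ===== VERDICT (by name: the statement is the Claim_ definition above) =====
theorem solve_spec : Claim_equal_solve := by
  intro n k _
  unfold Spec_solve solve solve_alt
  by_cases h : n > 35
  · simp [h]
  · simp only [if_neg h]
    have := go_eq n k n.toNat 0
    simpa using this
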